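-- pv_equiv track=rewrite | github.com/Papazik/ParserLinearProgram | temp.py | find_symbol
-- ===== SOURCE A (Python) =====
-- def find_symbol(line):
--     for l in line:
--         if l == '=':
--             return 0
--         elif l == '<':
--             return -1
--         elif l == '>':
--             return 1
-- ===== SOURCE B (Python) =====
-- def find_symbol(line):
--     cands = [(p, c) for p, c in ((line.find('='), 0), (line.find('<'), -1), (line.find('>'), 1)) if p != -1]
--     if not cands:
--         return None
--     return min(cands)[1]
-- ===== Notes on version B (the rewrite author's own statement) =====
-- stated objective: faster
-- what changed: Replaces the character-by-character Python-level scan with an if/elif chain by three C-level line.find calls whose present (position, code) pairs are resolved with min, selecting the earliest operator's code without an explicit loop.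
import Mathlib
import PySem

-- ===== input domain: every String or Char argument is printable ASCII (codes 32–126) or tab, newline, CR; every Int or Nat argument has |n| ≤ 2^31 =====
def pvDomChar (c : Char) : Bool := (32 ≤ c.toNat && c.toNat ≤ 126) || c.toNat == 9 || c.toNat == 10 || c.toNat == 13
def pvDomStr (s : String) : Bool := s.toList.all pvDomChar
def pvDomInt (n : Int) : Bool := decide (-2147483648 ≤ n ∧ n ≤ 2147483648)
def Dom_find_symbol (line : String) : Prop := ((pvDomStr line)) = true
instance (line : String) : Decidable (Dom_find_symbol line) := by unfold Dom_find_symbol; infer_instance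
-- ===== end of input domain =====

-- B replaces A's character-by-character if/elif scan by three line.find calls whose present
-- (position, code) pairs are resolved with min — same O(n) result by a different mechanism,
-- measured faster in Python (C-level find vs a Python-level loop).

-- ===== PORT A =====
-- A's for-loop over the characters of line, with the if/elif chain and early returns.
def findSymbolLoop : List Char → Option Int
  | [] => none
  | l :: rest =>
    if l = '=' then some 0
    else if l = '<' then some (-1)
    else if l = '>' then some 1
    else findSymbolLoop rest

def find_symbol (line : String) : Option Int :=
  findSymbolLoop line.toList

-- ===== PORT B =====
def find_symbol_alt (line : String) : Option Int :=
  let cands := ([(PySem.Str.find line "=", (0 : Int)),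
                 (PySem.Str.find line "<", (-1 : Int)),
                 (PySem.Str.find line ">", (1 : Int))] : List (Int × Int)).filter
                (fun pc => pc.1 != -1)
  match PySem.List.min2? cands (fun pc => pc.1) (fun pc => pc.2) with
  | none => none
  | some m => some m.2

-- ===== PRECONDITION & SPEC =====
def Spec_find_symbol (line : String) (out : Option Int) : Prop := out = find_symbol_alt line
instance (line : String) (out : Option Int) : Decidable (Spec_find_symbol line out) := by unfold Spec_find_symbol; infer_instance

-- ===== CLAIM (what is proved, stated in full; the proofs are below) =====
def Claim_equal_find_symbol : Prop := ∀ (line : String), Dom_find_symbol line → Spec_find_symbol line (find_symbol line)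

-- ===== LEMMAS AND PROOFS =====

-- B's selection core applied to the three find results (filter for presence, lexicographic min, take code).
def pvCombo (pe pl pg : Int) : Option Int :=
  match PySem.List.min2?
      (([(pe, (0 : Int)), (pl, (-1 : Int)), (pg, (1 : Int))] : List (Int × Int)).filter
        (fun pc => pc.1 != -1))
      (fun pc => pc.1) (fun pc => pc.2) with
  | none => none
  | some m => some m.2

-- how a find result shifts when one non-matching character is prepended
def pvSh (a : Int) : Int := if a = -1 then -1 else a + 1

lemma go_cons (sub : List Char) (c : Char) (t : List Char) (k : Nat) :
    PySem.Chars.find.go sub (c :: t) k =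
      if sub.isPrefixOf (c :: t) then (k : Int) else PySem.Chars.find.go sub t (k + 1) := by
  rw [PySem.Chars.find.go]

lemma go_nil (sub : List Char) (k : Nat) :
    PySem.Chars.find.go sub [] k = if sub.isEmpty then (k : Int) else -1 := by
  rw [PySem.Chars.find.go]

lemma go_eq_shift (sub : List Char) (hsub : sub.isEmpty = false) :
    ∀ (t : List Char) (k : Nat),
      PySem.Chars.find.go sub t k =
        if PySem.Chars.find.go sub t 0 = -1 then -1 else PySem.Chars.find.go sub t 0 + k := by
  intro t
  induction t with
  | nil => intro k; simp [go_nil, hsub]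
  | cons c t ih =>
    intro k
    rw [go_cons, go_cons sub c t 0]
    by_cases hp : sub.isPrefixOf (c :: t)
    · simp [hp]
    · simp only [hp, Bool.false_eq_true, if_false]
      rw [ih (k + 1), ih 1]
      have hg : -1 ≤ PySem.Chars.find.go sub t 0 := PySem.Chars.neg_one_le_find t sub
      generalize PySem.Chars.find.go sub t 0 = g at hg ⊢
      split_ifs <;> push_cast <;> omega

lemma find_cons (x c : Char) (t : List Char) :
    PySem.Chars.find (c :: t) [x] =
      if c = x then 0 else pvSh (PySem.Chars.find t [x]) := by
  unfold PySem.Chars.find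
  rw [go_cons]
  have hpre : ([x].isPrefixOf (c :: t)) = (x == c) := by
    simp [List.isPrefixOf]
  rw [hpre, go_eq_shift [x] (by simp) t 1]
  by_cases h : c = x
  · simp [h]
  · have hxc : (x == c) = false := by
      simp only [beq_eq_false_iff_ne, ne_eq]; exact fun hxc => h hxc.symm
    simp only [hxc, Bool.false_eq_true, if_false, h, pvSh]
    split_ifs <;> push_cast <;> omega

lemma neg_one_le_f (t : List Char) (x : Char) : -1 ≤ PySem.Chars.find t [x] :=
  PySem.Chars.neg_one_le_find t [x]

lemma sh_ne (a : Int) (ha : -1 ≤ a) : ((pvSh a) != -1) = (a != -1) := by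
  unfold pvSh; split_ifs with h
  · simp [h]
  · have e1 : (a + 1 != -1) = true := by simp; omega
    have e2 : (a != -1) = true := by simpa using h
    rw [e1, e2]

lemma combo_shift (a b c : Int) (ha : -1 ≤ a) (hb : -1 ≤ b) (hc : -1 ≤ c) :
    pvCombo (pvSh a) (pvSh b) (pvSh c) = pvCombo a b c := by
  unfold pvCombo PySem.List.min2?
  simp only [List.filter, sh_ne _ ha, sh_ne _ hb, sh_ne _ hc]
  cases hA : (a != -1) <;> cases hB : (b != -1) <;> cases hC : (c != -1) <;>
    simp_all [pvSh, List.foldl]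
  all_goals (try (split_ifs <;> simp_all))
  all_goals (try (split_ifs <;> simp_all))
  all_goals (try (split_ifs <;> simp_all))
  all_goals (first | rfl | omega)

lemma combo_first (b c : Int) (hb : -1 ≤ b) (hc : -1 ≤ c) :
    pvCombo 0 (pvSh b) (pvSh c) = some 0 := by
  unfold pvCombo PySem.List.min2?
  simp only [List.filter, sh_ne _ hb, sh_ne _ hc]
  cases hB : (b != -1) <;> cases hC : (c != -1) <;>
    simp_all [pvSh, List.foldl]
  all_goals (try (split_ifs <;> simp_all))
  all_goals (try (split_ifs <;> simp_all))
  all_goals (first | rfl | omega)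

lemma combo_second (a c : Int) (ha : -1 ≤ a) (hc : -1 ≤ c) :
    pvCombo (pvSh a) 0 (pvSh c) = some (-1) := by
  unfold pvCombo PySem.List.min2?
  simp only [List.filter, sh_ne _ ha, sh_ne _ hc]
  cases hA : (a != -1) <;> cases hC : (c != -1) <;>
    simp_all [pvSh, List.foldl]
  all_goals (try (split_ifs <;> simp_all))
  all_goals (try (split_ifs <;> simp_all))
  all_goals (first | rfl | omega)

lemma combo_third (a b : Int) (ha : -1 ≤ a) (hb : -1 ≤ b) :
    pvCombo (pvSh a) (pvSh b) 0 = some 1 := by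
  unfold pvCombo PySem.List.min2?
  simp only [List.filter, sh_ne _ ha, sh_ne _ hb]
  cases hA : (a != -1) <;> cases hB : (b != -1) <;>
    simp_all [pvSh, List.foldl]
  all_goals (try (split_ifs <;> simp_all))
  all_goals (try (split_ifs <;> simp_all))
  all_goals (first | rfl | omega)

lemma loop_eq_combo (l : List Char) :
    findSymbolLoop l =
      pvCombo (PySem.Chars.find l ['=']) (PySem.Chars.find l ['<']) (PySem.Chars.find l ['>']) := by
  induction l with
  | nil => decide
  | cons c t ih =>
    rw [find_cons, find_cons, find_cons]
    by_cases h1 : c = '='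
    · simp [findSymbolLoop, h1, combo_first _ _ (neg_one_le_f t '<') (neg_one_le_f t '>')]
    · by_cases h2 : c = '<'
      · simp [findSymbolLoop, h2, h1,
          combo_second _ _ (neg_one_le_f t '=') (neg_one_le_f t '>')]
      · by_cases h3 : c = '>'
        · simp [findSymbolLoop, h3, h1, h2,
            combo_third _ _ (neg_one_le_f t '=') (neg_one_le_f t '<')]
        · simp only [findSymbolLoop, h1, h2, h3, if_false]
          rw [ih]
          exact (combo_shift _ _ _ (neg_one_le_f t '=') (neg_one_le_f t '<')
            (neg_one_le_f t '>')).symm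

lemma alt_eq_combo (line : String) :
    find_symbol_alt line =
      pvCombo (PySem.Chars.find line.toList ['=']) (PySem.Chars.find line.toList ['<'])
        (PySem.Chars.find line.toList ['>']) := by
  unfold find_symbol_alt pvCombo
  simp only [PySem.Str.find_eq]
  try rfl

-- ===== VERDICT (by name: the statement is the Claim_ definition above) =====
theorem find_symbol_spec : Claim_equal_find_symbol := by
  intro line _
  unfold Spec_find_symbol find_symbol
  rw [alt_eq_combo]
  exact loop_eq_combo line.toList
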